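-- pv_equiv track=rewrite | github.com/fwoerister/aoc2015 | days/day19.py | gen_distinct_molecules
-- ===== SOURCE A (Python) =====
-- def gen_distinct_molecules(molecule, rules, prefix=""):
--     applicable_rule_keys = [key for key in rules if molecule.startswith(key)]
--
--     if molecule == '':
--         return {prefix}
--
--     if len(applicable_rule_keys) == 0:
--         return gen_distinct_molecules(molecule[1:], rules, prefix + molecule[0])
--
--     new_molecules = set()
--     for key in applicable_rule_keys:
--         for to_m in rules[key]:
--             new_molecules.add(prefix + to_m + molecule[len(key):])
--         new_molecules = new_molecules.union(gen_distinct_molecules(molecule[len(key):], rules, prefix + key))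
--     return new_molecules
-- ===== SOURCE B (Python) =====
-- def gen_distinct_molecules(molecule, rules, prefix=""):
--     # Bottom-up dynamic programming instead of A's exponential recursion: A's recursive
--     # call at suffix position j always carries prefix + molecule[:j], so its result only
--     # depends on j; tabulate results[j] (a set) for j = n..0 in one backward pass and
--     # return results[0].
--     n = len(molecule)
--     present = [key for key in rules if key in molecule]
--     results = [None] * (n + 1)
--     results[n] = {prefix + molecule}
--     for j in range(n - 1, -1, -1):
--         keys = [key for key in present if molecule.startswith(key, j)]
--         if not keys:
--             results[j] = results[j + 1]
--         else:
--             out = set()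
--             base = prefix + molecule[:j]
--             for key in keys:
--                 suffix = molecule[j + len(key):]
--                 for to_m in rules[key]:
--                     out.add(base + to_m + suffix)
--                 out |= results[j + len(key)]
--             results[j] = out
--     return results[0]
-- ===== Notes on version B (the rewrite author's own statement) =====
-- stated objective: alternative
-- what changed: B replaces A's branching recursion (which at each applicable key recurses on the remaining suffix and unions the results, revisiting overlapping suffixes) by bottom-up dynamic programming: A's recursive call at suffix position j always carries prefix + molecule[:j] and so depends only on j, hence B tabulates results[j] for j = n..0 in one backward pass, each suffix solved once; Pre_ excludes only rule sets with an empty key on a nonempty molecule (A recurses forever: RecursionError) and association lists with duplicate keys (not representable as the Python dict A receives).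
import Mathlib
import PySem

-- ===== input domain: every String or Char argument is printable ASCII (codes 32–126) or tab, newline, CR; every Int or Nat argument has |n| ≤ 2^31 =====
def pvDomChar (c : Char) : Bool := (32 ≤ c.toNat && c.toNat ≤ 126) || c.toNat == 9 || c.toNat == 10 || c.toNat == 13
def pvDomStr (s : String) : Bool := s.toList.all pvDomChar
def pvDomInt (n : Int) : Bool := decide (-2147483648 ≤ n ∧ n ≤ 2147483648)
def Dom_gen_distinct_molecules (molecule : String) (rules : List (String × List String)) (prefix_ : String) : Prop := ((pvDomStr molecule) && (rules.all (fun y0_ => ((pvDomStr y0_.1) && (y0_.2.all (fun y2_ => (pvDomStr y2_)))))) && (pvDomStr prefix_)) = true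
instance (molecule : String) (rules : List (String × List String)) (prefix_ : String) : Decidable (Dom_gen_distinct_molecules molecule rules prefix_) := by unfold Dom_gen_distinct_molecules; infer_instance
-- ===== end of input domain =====

-- B replaces A's exponential branching recursion by bottom-up dynamic programming over
-- suffix positions; return-value equivalence only (neither mutates its arguments).

-- shared type adaptation: the dict[str, list[str]] as char-level association list
def pvCharRules (rules : List (String × List String)) : List (List Char × List (List Char)) :=
  rules.map (fun p => (p.1.toList, p.2.map String.toList))

-- ===== PORT A =====
-- rules[key]: first (only, under Pre_) entry with that key
def pvLookup (rules : List (List Char × List (List Char))) (k : List Char) : List (List Char) :=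
  ((rules.find? (fun p => p.1 == k)).map Prod.snd).getD []

-- literal transliteration of A; fuel = molecule's remaining length + 1 only makes the
-- recursion total (an empty key makes Python A recurse forever; Pre_ excludes that)
def pvGenA : Nat → List Char → List (List Char × List (List Char)) → List Char → List (List Char)
  | 0, _, _, _ => []
  | fuel+1, mol, rules, pfx =>
    let applicable := (rules.map Prod.fst).filter (fun k => PySem.Chars.startswith mol k)
    if mol = [] then [pfx]
    else if applicable = [] then
      pvGenA fuel (mol.drop 1) rules (pfx ++ mol.take 1)
    else
      applicable.foldl (fun acc k =>
        PySem.Set.union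
          ((pvLookup rules k).foldl (fun s t => PySem.Set.add s (pfx ++ t ++ mol.drop k.length)) acc)
          (pvGenA fuel (mol.drop k.length) rules (pfx ++ k)))
        PySem.Set.empty

def gen_distinct_molecules (molecule : String) (rules : List (String × List String)) (prefix_ : String) : List String :=
  (pvGenA (molecule.toList.length + 1) molecule.toList (pvCharRules rules) prefix_.toList).map String.mk

-- ===== PORT B =====
-- one iteration of Source B's backward loop body: fill results[j] from the later entries
-- (molecule.startswith(key, j) is key.isPrefixOf (molecule[j:]) for 0 ≤ j ≤ len, exact here)
def pvStepB (mol : List Char) (rules : List (List Char × List (List Char))) (pfx : List Char)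
    (present : List (List Char)) (res : List (List (List Char))) (j : Nat) : List (List (List Char)) :=
  let keys := present.filter (fun k => PySem.Chars.startswith (mol.drop j) k)
  if keys = [] then res.set j (res.getD (j+1) [])
  else res.set j (keys.foldl (fun out k =>
    PySem.Set.union
      ((pvLookup rules k).foldl (fun out t =>
        PySem.Set.add out (pfx ++ mol.take j ++ t ++ mol.drop (j + k.length))) out)
      (res.getD (j + k.length) [])) PySem.Set.empty)

def pvGenB (mol : List Char) (rules : List (List Char × List (List Char))) (pfx : List Char) : List (List Char) :=
  -- present = [key for key in rules if key in molecule]  (key in molecule: substring test)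
  let present := (rules.map Prod.fst).filter (fun k => decide (k <:+: mol))
  -- results = [None] * (n + 1); results[n] = {prefix + molecule}  (the unused None as [])
  let res0 := (List.replicate (mol.length + 1) ([] : List (List Char))).set mol.length [pfx ++ mol]
  -- for j in range(n - 1, -1, -1): the reversed Nat range, exact here since 0 ≤ j < n
  let res := ((List.range mol.length).reverse).foldl (pvStepB mol rules pfx present) res0
  res.getD 0 []

def gen_distinct_molecules_alt (molecule : String) (rules : List (String × List String)) (prefix_ : String) : List String :=
  (pvGenB molecule.toList (pvCharRules rules) prefix_.toList).map String.mk

-- ===== PRECONDITION & SPEC =====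
-- For a nonempty molecule, Pre_ excludes rule sets with an empty key (Python A recurses forever
-- there: RecursionError) and association lists with duplicate keys (a Python dict cannot hold
-- duplicate keys, so such lists do not represent any input A receives).
def Pre_gen_distinct_molecules (molecule : String) (rules : List (String × List String)) (prefix_ : String) : Prop :=
  molecule.toList = [] ∨
  ((∀ p ∈ rules, p.1.toList ≠ []) ∧ rules.Pairwise (fun a b => a.1 ≠ b.1))
instance (molecule : String) (rules : List (String × List String)) (prefix_ : String) : Decidable (Pre_gen_distinct_molecules molecule rules prefix_) := by
  unfold Pre_gen_distinct_molecules; infer_instance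

def pvWitness_gen_distinct_molecules : String × (List (String × List String)) × String :=
  ("AB", [("A", ["x"])], "")

def Spec_gen_distinct_molecules (molecule : String) (rules : List (String × List String)) (prefix_ : String) (out : List String) : Prop :=
  out = gen_distinct_molecules_alt molecule rules prefix_
instance (molecule : String) (rules : List (String × List String)) (prefix_ : String) (out : List String) : Decidable (Spec_gen_distinct_molecules molecule rules prefix_ out) := by
  unfold Spec_gen_distinct_molecules; infer_instance

-- ===== CLAIM (what is proved, stated in full; the proofs are below) =====
def Claim_equal_gen_distinct_molecules : Prop := ∀ (molecule : String) (rules : List (String × List String)) (prefix_ : String), Dom_gen_distinct_molecules molecule rules prefix_ → Pre_gen_distinct_molecules molecule rules prefix_ → Spec_gen_distinct_molecules molecule rules prefix_ (gen_distinct_molecules molecule rules prefix_)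

-- ===== LEMMAS AND PROOFS =====

-- the value A computes from suffix position j (with just enough fuel)
def pvAV (rules : List (List Char × List (List Char))) (mol pfx : List Char) (j : Nat) : List (List Char) :=
  pvGenA (mol.length - j + 1) (mol.drop j) rules (pfx ++ mol.take j)

theorem pv_sw_prefix {mol k : List Char} {i : Nat}
    (h : PySem.Chars.startswith (mol.drop i) k = true) : k <+: mol.drop i :=
  List.isPrefixOf_iff_prefix.mp (by simpa [PySem.Chars.startswith] using h)

theorem pv_key_facts (rules : List (List Char × List (List Char))) (mol : List Char) (j : Nat)
    (h1 : ∀ p ∈ rules, p.1 ≠ []) (k : List Char)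
    (hk : k ∈ (rules.map Prod.fst).filter (fun k => PySem.Chars.startswith (mol.drop j) k)) :
    1 ≤ k.length ∧ j + k.length ≤ mol.length ∧
      (mol.drop j).drop k.length = mol.drop (j + k.length) ∧
      k = (mol.drop j).take k.length := by
  have hsw : PySem.Chars.startswith (mol.drop j) k = true := by
    simpa using List.of_mem_filter hk
  have hkm : k ∈ rules.map Prod.fst := List.mem_of_mem_filter hk
  obtain ⟨p, hp, rfl⟩ := List.mem_map.mp hkm
  have hne : p.1 ≠ [] := h1 p hp
  have hlen1 : 1 ≤ p.1.length := by
    cases h : p.1 with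
    | nil => exact absurd h hne
    | cons a l => simp
  have hpre := pv_sw_prefix hsw
  have hle := hpre.length_le
  rw [List.length_drop] at hle
  refine ⟨hlen1, by omega, by rw [List.drop_drop, Nat.add_comm], List.prefix_iff_eq_take.mp hpre⟩

-- A's result does not depend on the exact fuel, as long as it suffices
theorem pv_fuel_stable (rules : List (List Char × List (List Char))) (mol pfx : List Char)
    (h1 : ∀ p ∈ rules, p.1 ≠ []) :
    ∀ (f g j : Nat), j ≤ mol.length → mol.length - j < f → mol.length - j < g →
      pvGenA f (mol.drop j) rules (pfx ++ mol.take j) =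
        pvGenA g (mol.drop j) rules (pfx ++ mol.take j) := by
  intro f
  induction f with
  | zero => intro g j _ hf _; omega
  | succ f ih =>
    intro g j hj hf hg
    cases g with
    | zero => omega
    | succ g =>
      unfold pvGenA
      by_cases hend : mol.drop j = []
      · rw [if_pos hend, if_pos hend]
      · rw [if_neg hend, if_neg hend]
        have hjlt : j < mol.length := by
          rcases Nat.lt_or_ge j mol.length with h' | h'
          · exact h'
          · exact absurd (List.drop_eq_nil_iff.mpr h') hend
        by_cases happ : (rules.map Prod.fst).filter
            (fun k => PySem.Chars.startswith (mol.drop j) k) = []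
        · simp only [happ, if_true]
          have hd1 : (mol.drop j).drop 1 = mol.drop (j+1) := by rw [List.drop_drop]
          have ht1 : (pfx ++ mol.take j) ++ (mol.drop j).take 1 = pfx ++ mol.take (j+1) := by
            rw [List.append_assoc, ← List.take_add]
          rw [hd1, ht1]
          exact ih g (j+1) (by omega) (by omega) (by omega)
        · simp only [happ, if_false]
          apply PySem.List.foldl_congr_mem
          intro acc k hk
          obtain ⟨hk1, hk2, hk3, hk4⟩ := pv_key_facts rules mol j h1 k hk
          have htk : (pfx ++ mol.take j) ++ k = pfx ++ mol.take (j + k.length) := by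
            conv_lhs => rw [hk4]
            rw [List.append_assoc, ← List.take_add]
          rw [hk3, htk]
          rw [ih g (j + k.length) (by omega) (by omega) (by omega)]

-- a key matching at some position of the molecule is a substring of the molecule
theorem pv_present_filter (rules : List (List Char × List (List Char))) (mol : List Char) (j : Nat) :
    ((rules.map Prod.fst).filter (fun k => decide (k <:+: mol))).filter
      (fun k => PySem.Chars.startswith (mol.drop j) k) =
    (rules.map Prod.fst).filter (fun k => PySem.Chars.startswith (mol.drop j) k) := by
  rw [List.filter_filter]
  apply List.filter_congr
  intro k _
  cases hsw : PySem.Chars.startswith (mol.drop j) k with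
  | false => simp
  | true =>
    have hinf : k <:+: mol :=
      List.infix_iff_prefix_suffix.mpr ⟨mol.drop j, pv_sw_prefix hsw, List.drop_suffix j mol⟩
    simp [hinf]

theorem pv_getD_set (res : List (List (List Char))) (j j' : Nat) (v : List (List Char))
    (hj : j < res.length) :
    (res.set j v).getD j' [] = if j' = j then v else res.getD j' [] := by
  rw [List.getD_eq_getElem?_getD, List.getD_eq_getElem?_getD, List.getElem?_set]
  by_cases h : j' = j
  · subst h
    simp [hj]
  · simp [h, Ne.symm h]

-- the backward table loop fills every entry with A's suffix value
theorem pv_tableB (rules : List (List Char × List (List Char))) (mol pfx : List Char)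
    (h1 : ∀ p ∈ rules, p.1 ≠ []) :
    ∀ (j0 : Nat) (res : List (List (List Char))), j0 ≤ mol.length →
      res.length = mol.length + 1 →
      (∀ j', j0 ≤ j' → j' ≤ mol.length → res.getD j' [] = pvAV rules mol pfx j') →
      ∀ j', j' ≤ mol.length →
        (((List.range j0).reverse).foldl
          (pvStepB mol rules pfx ((rules.map Prod.fst).filter (fun k => decide (k <:+: mol)))) res).getD j' [] =
          pvAV rules mol pfx j' := by
  intro j0
  induction j0 with
  | zero =>
    intro res _ _ hinv j' hj'
    simpa using hinv j' (by omega) hj'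
  | succ j0 ih =>
    intro res hj0 hlen hinv j' hj'
    rw [List.range_succ, List.reverse_append, List.reverse_singleton, List.singleton_append,
      List.foldl_cons]
    have hj0lt : j0 < mol.length := by omega
    have hj0res : j0 < res.length := by omega
    have hdropne : mol.drop j0 ≠ [] := by
      intro h
      have := List.drop_eq_nil_iff.mp h
      omega
    -- the step writes pvAV j0 into entry j0 and keeps the later entries
    have hstep : ∀ j'', j0 ≤ j'' → j'' ≤ mol.length →
        (pvStepB mol rules pfx ((rules.map Prod.fst).filter (fun k => decide (k <:+: mol))) res j0).getD j'' []
          = pvAV rules mol pfx j'' := by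
      intro j'' hj''1 hj''2
      unfold pvStepB
      rw [pv_present_filter rules mol j0]
      by_cases happ : (rules.map Prod.fst).filter
          (fun k => PySem.Chars.startswith (mol.drop j0) k) = []
      · simp only [happ, if_true]
        rw [pv_getD_set res j0 j'' _ hj0res]
        by_cases he : j'' = j0
        · subst he
          rw [hinv (j''+1) (by omega) (by omega)]
          unfold pvAV pvGenA
          rw [if_neg hdropne]
          simp only [happ, if_true]
          have hd1 : (mol.drop j'').drop 1 = mol.drop (j''+1) := by rw [List.drop_drop]
          have ht1 : (pfx ++ mol.take j'') ++ (mol.drop j'').take 1 = pfx ++ mol.take (j''+1) := by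
            rw [List.append_assoc, ← List.take_add]
          rw [hd1, ht1]
          exact (pv_fuel_stable rules mol pfx h1 (mol.length - j'' + 1 - 1) (mol.length - (j''+1) + 1)
            (j''+1) (by omega) (by omega) (by omega)).symm
        · rw [if_neg he]
          exact hinv j'' (by omega) hj''2
      · simp only [happ, if_false]
        rw [pv_getD_set res j0 j'' _ hj0res]
        by_cases he : j'' = j0
        · subst he
          unfold pvAV pvGenA
          rw [if_neg hdropne]
          simp only [happ, if_false]
          symm
          apply PySem.List.foldl_congr_mem
          intro acc k hk
          obtain ⟨hk1, hk2, hk3, hk4⟩ := pv_key_facts rules mol j'' h1 k hk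
          have htk : (pfx ++ mol.take j'') ++ k = pfx ++ mol.take (j'' + k.length) := by
            conv_lhs => rw [hk4]
            rw [List.append_assoc, ← List.take_add]
          show PySem.Set.update _ _ = PySem.Set.update _ _
          congr 1
          · apply PySem.List.foldl_congr_mem
            intro s t _
            simp [hk3, List.append_assoc]
          · rw [hk3, htk, hinv (j'' + k.length) (by omega) (by omega)]
            exact pv_fuel_stable rules mol pfx h1 (mol.length - j'' + 1 - 1)
              (mol.length - (j'' + k.length) + 1) (j'' + k.length) (by omega) (by omega) (by omega)
        · rw [if_neg he]
          exact hinv j'' (by omega) hj''2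
    exact ih (pvStepB mol rules pfx ((rules.map Prod.fst).filter (fun k => decide (k <:+: mol))) res j0)
      (by omega) (by simp only [pvStepB]; split <;> simp [hlen]) hstep j' hj'

-- ===== VERDICT (the statement is the Claim_ definition above) =====
theorem gen_distinct_molecules_spec : Claim_equal_gen_distinct_molecules := by
  intro molecule rules prefix_ _ hpre
  unfold Spec_gen_distinct_molecules
  rcases hpre with hempty | ⟨h1, _h2⟩
  · -- empty molecule: both sides return the singleton {prefix}
    unfold gen_distinct_molecules gen_distinct_molecules_alt
    rw [hempty]
    show List.map String.mk (pvGenA (0 + 1) [] (pvCharRules rules) prefix_.toList) = _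
    simp [pvGenA, pvGenB]
  · have h1' : ∀ p ∈ pvCharRules rules, p.1 ≠ [] := by
      intro p hp
      simp only [pvCharRules, List.mem_map] at hp
      obtain ⟨q, hq, rfl⟩ := hp
      exact h1 q hq
    unfold gen_distinct_molecules gen_distinct_molecules_alt
    congr 1
    set mol := molecule.toList with hmol
    set crules := pvCharRules rules with hcr
    set pfx := prefix_.toList with hpfx
    -- B: the table holds A's suffix values; entry 0 is A's result
    have hres0len : ((List.replicate (mol.length + 1) ([] : List (List Char))).set mol.length
        [pfx ++ mol]).length = mol.length + 1 := by simp
    have hres0 : ∀ j', mol.length ≤ j' → j' ≤ mol.length →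
        ((List.replicate (mol.length + 1) ([] : List (List Char))).set mol.length
          [pfx ++ mol]).getD j' [] = pvAV crules mol pfx j' := by
      intro j' hj'1 hj'2
      have hj' : j' = mol.length := by omega
      subst hj'
      rw [pv_getD_set _ _ _ _ (by simp), if_pos rfl]
      unfold pvAV
      rw [List.drop_length, List.take_of_length_le (le_refl mol.length)]
      simp [pvGenA]
    have htab := pv_tableB crules mol pfx h1' mol.length _ (le_refl _) hres0len hres0 0
      (by omega)
    have hB : pvGenB mol crules pfx = pvAV crules mol pfx 0 := by
      have hBdef : pvGenB mol crules pfx =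
          ((((List.range mol.length).reverse).foldl
            (pvStepB mol crules pfx ((crules.map Prod.fst).filter (fun k => decide (k <:+: mol))))
            ((List.replicate (mol.length + 1) ([] : List (List Char))).set mol.length
              [pfx ++ mol])).getD 0 []) := rfl
      rw [hBdef, htab]
    rw [hB]
    -- A: the top-level call is the suffix value at position 0
    unfold pvAV
    have := pv_fuel_stable crules mol pfx h1' (mol.length + 1) (mol.length - 0 + 1) 0
      (by omega) (by omega) (by omega)
    simpa using this
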